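-- pv_equiv track=rewrite | github.com/clips/MBSP | tokenizer.py | split_chars
-- ===== SOURCE A (Python) =====
-- def split_chars(word, chunk=".-"):
--     """ Returns a list of characters in the given string.
--         Characters in the defined chunk will be kept together,
--         i.e. split_chars("Hello...", chunk="l.") => ["H", "e", "ll", "o", "..."]
--     """
--     p = [""]
--     for ch in word:
--         if ch in chunk and p[-1].startswith(ch):
--             p[-1] += ch
--         else:
--             p.append(ch)
--     return p[1:] or [""]
-- ===== SOURCE B (Python) =====
-- def split_chars(word, chunk=".-"):
--     """ Returns a list of characters in the given string.
--         Characters in the defined chunk will be kept together.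
--     """
--     out = []
--     i = 0
--     n = len(word)
--     while i < n:
--         ch = word[i]
--         if ch in chunk:
--             j = i + 1
--             while j < n and word[j] == ch:
--                 j += 1
--             out.append(ch * (j - i))
--             i = j
--         else:
--             out.append(ch)
--             i += 1
--     return out or [""]
-- ===== Notes on version B (the rewrite author's own statement) =====
-- stated objective: alternative
-- what changed: A scans char-by-char mutating the last element of a growing accumulator (via startswith on p[-1]); B is a two-pointer run scanner: for each chunk char it advances an index over the whole run and emits it at once, non-chunk chars are emitted individually, with no sentinel element or accumulator mutation.
import Mathlib
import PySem

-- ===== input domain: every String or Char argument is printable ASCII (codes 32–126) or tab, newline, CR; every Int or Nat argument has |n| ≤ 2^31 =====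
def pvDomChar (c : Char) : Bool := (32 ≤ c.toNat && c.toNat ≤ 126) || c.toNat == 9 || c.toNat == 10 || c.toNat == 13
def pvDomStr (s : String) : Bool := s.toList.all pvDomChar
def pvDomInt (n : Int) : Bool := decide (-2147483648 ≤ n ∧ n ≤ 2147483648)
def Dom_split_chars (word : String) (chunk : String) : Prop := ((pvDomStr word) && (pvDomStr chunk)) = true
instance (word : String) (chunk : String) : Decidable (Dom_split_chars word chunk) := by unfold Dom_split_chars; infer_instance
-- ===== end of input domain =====

-- B is an alternative decomposition: a run scanner instead of A's mutate-the-last-accumulator scan; same cost.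

-- ===== PORT A =====
-- one loop step of A: ch merged into p[-1] if ch is a chunk char and p[-1] starts with ch
def pvAStep (chunkL : List Char) (p : List (List Char)) (ch : Char) : List (List Char) :=
  if chunkL.contains ch && PySem.Chars.startswith (p.getLastD []) [ch] then
    p.dropLast ++ [p.getLastD [] ++ [ch]]
  else
    p ++ [[ch]]

def split_chars (word : String) (chunk : String) : List String :=
  let p := word.toList.foldl (pvAStep chunk.toList) [[]]
  let l := p.drop 1                                        -- p[1:] or [""]
  if l.isEmpty then [""] else l.map String.ofList

-- ===== PORT B =====
-- B's outer while loop: each step consumes one char, or a whole run of a chunk char (B's inner while = takeWhile/dropWhile)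
def pvBRuns (chunkL : List Char) : List Char → List (List Char)
  | [] => []
  | c :: cs =>
    if chunkL.contains c then
      (c :: cs.takeWhile (· == c)) :: pvBRuns chunkL (cs.dropWhile (· == c))
    else
      [c] :: pvBRuns chunkL cs
  termination_by l => l.length
  decreasing_by
  · exact Nat.lt_succ_of_le (cs.length_dropWhile_le (· == c))
  · simp

def split_chars_alt (word : String) (chunk : String) : List String :=
  let out := (pvBRuns chunk.toList word.toList).map String.ofList   -- out or [""]
  if out.isEmpty then [""] else out

-- ===== PRECONDITION & SPEC =====
def Spec_split_chars (word : String) (chunk : String) (out : List String) : Prop := out = split_chars_alt word chunk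
instance (word : String) (chunk : String) (out : List String) : Decidable (Spec_split_chars word chunk out) := by unfold Spec_split_chars; infer_instance

-- ===== CLAIM (what is proved, stated in full; the proofs are below) =====
def Claim_equal_split_chars : Prop := ∀ (word : String) (chunk : String), Dom_split_chars word chunk → Spec_split_chars word chunk (split_chars word chunk)

-- ===== LEMMAS AND PROOFS =====

-- [c] is a prefix of r iff r starts with c
lemma startswith_singleton (r : List Char) (c : Char) :
    PySem.Chars.startswith r [c] = true ↔ ∃ t, r = c :: t := by
  rw [PySem.Chars.startswith_iff]
  constructor
  · rintro ⟨t, ht⟩; exact ⟨t, ht.symm⟩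
  · rintro ⟨t, rfl⟩; exact ⟨t, rfl⟩

-- while A's last accumulator element is a run of the chunk char c, A keeps merging into it
lemma foldA_run (chunkL : List Char) (c : Char) (hc : chunkL.contains c = true) :
    ∀ (cs : List Char) (acc : List (List Char)) (r : List Char), (∃ t, r = c :: t) →
      (cs.dropWhile (· == c)).foldl (pvAStep chunkL) (acc ++ [r ++ cs.takeWhile (· == c)])
        = cs.foldl (pvAStep chunkL) (acc ++ [r]) := by
  intro cs
  induction cs with
  | nil => intro acc r _; simp
  | cons d cs ih =>
    intro acc r hr
    by_cases hd : d = c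
    · subst hd
      have hstep : pvAStep chunkL (acc ++ [r]) d = acc ++ [r ++ [d]] := by
        unfold pvAStep
        rw [List.getLastD_concat, List.dropLast_concat, hc, (startswith_singleton r d).2 hr]
        simp
      simp only [List.takeWhile_cons, List.dropWhile_cons, beq_self_eq_true, if_true,
        List.foldl_cons, hstep]
      have := ih acc (r ++ [d]) (by obtain ⟨t, rfl⟩ := hr; exact ⟨t ++ [d], by simp⟩)
      simpa using this
    · have hne : (d == c) = false := beq_false_of_ne hd
      simp [hne]

-- A's fold from any accumulator whose last element cannot absorb the next char appends exactly B's runs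
lemma foldA_eq_runs (chunkL : List Char) :
    ∀ (l : List Char) (acc : List (List Char)) (r : List Char),
      (∀ c t, r = c :: t → chunkL.contains c = true → l.head? ≠ some c) →
      l.foldl (pvAStep chunkL) (acc ++ [r]) = (acc ++ [r]) ++ pvBRuns chunkL l := by
  intro l
  induction l using pvBRuns.induct chunkL with
  | case1 => intro acc r _; simp [pvBRuns]
  | case2 c cs hc ih =>
    intro acc r hr
    have hstep : pvAStep chunkL (acc ++ [r]) c = (acc ++ [r]) ++ [[c]] := by
      have hcond : (chunkL.contains c && PySem.Chars.startswith r [c]) = false := by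
        by_cases hs : PySem.Chars.startswith r [c] = true
        · obtain ⟨t, rfl⟩ := (startswith_singleton r c).1 hs
          exact absurd rfl (hr c t rfl hc)
        · rw [Bool.eq_false_iff.mpr hs]; simp
      unfold pvAStep
      rw [List.getLastD_concat, hcond]
      simp
    simp only [List.foldl_cons, hstep]
    have hrun := foldA_run chunkL c hc cs (acc ++ [r]) [c] ⟨[], rfl⟩
    rw [← hrun]
    have hhead : ∀ c' t, (c :: cs.takeWhile (· == c)) = c' :: t → chunkL.contains c' = true →
        (cs.dropWhile (· == c)).head? ≠ some c' := by
      rintro c' t h _ hh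
      cases h
      have hm := List.head?_dropWhile_not (· == c) cs
      rw [hh] at hm
      simp at hm
    have := ih (acc ++ [r]) (c :: cs.takeWhile (· == c)) hhead
    simp only [List.singleton_append] at this ⊢
    rw [this, pvBRuns, if_pos hc]
    simp
  | case3 c cs hc ih =>
    intro acc r hr
    have hcf : chunkL.contains c = false := by simpa using hc
    have hstep : pvAStep chunkL (acc ++ [r]) c = (acc ++ [r]) ++ [[c]] := by
      unfold pvAStep
      rw [List.getLastD_concat, hcf]
      simp
    simp only [List.foldl_cons, hstep]
    have hhead : ∀ c' t, ([c] : List Char) = c' :: t → chunkL.contains c' = true →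
        cs.head? ≠ some c' := by
      rintro c' t h hcc
      cases h
      rw [hcf] at hcc
      exact absurd hcc (by simp)
    have := ih (acc ++ [r]) [c] hhead
    rw [this, pvBRuns, if_neg hc]
    simp

-- ===== VERDICT (by name: the statement is the Claim_ definition above) =====
theorem split_chars_spec : Claim_equal_split_chars := by
  intro word chunk _
  unfold Spec_split_chars split_chars split_chars_alt
  have h := foldA_eq_runs chunk.toList word.toList [] []
    (by rintro c t h; cases h)
  simp only [List.nil_append] at h
  rw [h]
  simp only [List.cons_append, List.nil_append, List.drop_succ_cons, List.drop_zero]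
  cases hr : pvBRuns chunk.toList word.toList with
  | nil => rfl
  | cons x xs => simp
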